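-- pv_equiv track=rewrite | github.com/Firsikita/tochkaTest | run.py | room_accepts
-- ===== SOURCE A (Python) =====
-- from typing import Tuple, Dict, List
--
-- def room_accepts(rooms: Tuple[Tuple[str, ...], ...], room_idx: int, chr: str) -> Tuple[bool, int]:
--     col = rooms[room_idx]
--     deep = len(col)
--     if any(c not in ('.', chr) for c in col):
--         return (False, -1)
--
--     for d in range(deep - 1, -1, -1):
--         if col[d] == '.':
--             return (True, d)
--
--     return (False, -1)
-- ===== SOURCE B (Python) =====
-- def room_accepts(rooms, room_idx, chr):
--     col = rooms[room_idx]
--     valid = True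
--     last_dot = -1
--     for i, c in enumerate(col):
--         if c not in ('.', chr):
--             valid = False
--         elif c == '.':
--             last_dot = i
--     if not valid or last_dot < 0:
--         return (False, -1)
--     return (True, last_dot)
-- ===== Notes on version B (the rewrite author's own statement) =====
-- stated objective: alternative
-- what changed: Fuses A's any()-validity scan plus separate reverse index loop into a single forward pass maintaining a validity flag and the last empty-slot index.
import Mathlib
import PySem

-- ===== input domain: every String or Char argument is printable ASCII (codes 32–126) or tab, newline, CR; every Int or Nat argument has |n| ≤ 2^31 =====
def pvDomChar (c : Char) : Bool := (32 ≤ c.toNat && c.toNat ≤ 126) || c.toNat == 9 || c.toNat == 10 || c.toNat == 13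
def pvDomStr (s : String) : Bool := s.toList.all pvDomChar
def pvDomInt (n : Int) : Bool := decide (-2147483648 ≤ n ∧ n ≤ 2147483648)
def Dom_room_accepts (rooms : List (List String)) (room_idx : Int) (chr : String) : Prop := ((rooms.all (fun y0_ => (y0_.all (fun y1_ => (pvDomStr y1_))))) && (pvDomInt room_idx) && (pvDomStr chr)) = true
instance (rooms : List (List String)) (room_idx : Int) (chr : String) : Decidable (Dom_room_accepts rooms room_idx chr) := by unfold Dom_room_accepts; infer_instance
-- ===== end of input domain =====

-- B fuses A's any()-validity scan and separate reverse loop into one forward pass (alternative decomposition; return value equivalence).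


-- ===== PORT A =====
-- for d in range(deep-1, -1, -1): if col[d] == '.': return (True, d)
def aScan (col : List String) : List Int → Bool × Int
  | [] => (false, -1)
  | d :: rest => if PySem.List.pyGetD col d "" == "." then (true, d) else aScan col rest

def room_accepts (rooms : List (List String)) (room_idx : Int) (chr : String) : Bool × Int :=
  match PySem.List.pyGet? rooms room_idx with
  | none => (false, -1)  -- IndexError; excluded by Pre_
  | some col =>
    if col.any (fun c => !(c == "." || c == chr)) then (false, -1)
    else aScan col (PySem.List.pyRange ((col.length : Int) - 1) (-1) (-1))

-- ===== PORT B =====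
def bStep (chr : String) (st : Bool × Int) (ic : Int × String) : Bool × Int :=
  if !(ic.2 == "." || ic.2 == chr) then (false, st.2)
  else if ic.2 == "." then (st.1, ic.1)
  else st

def room_accepts_alt (rooms : List (List String)) (room_idx : Int) (chr : String) : Bool × Int :=
  match PySem.List.pyGet? rooms room_idx with
  | none => (false, -1)  -- IndexError; excluded by Pre_
  | some col =>
    let st := (PySem.List.enumerate col 0).foldl (bStep chr) (true, -1)
    if !st.1 || st.2 < 0 then (false, -1) else (true, st.2)

-- ===== PRECONDITION & SPEC =====
-- A raises IndexError when room_idx is out of range for rooms; exactly those inputs are excluded.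
def Pre_room_accepts (rooms : List (List String)) (room_idx : Int) (chr : String) : Prop :=
  PySem.Raise.InRange rooms.length room_idx
instance (rooms : List (List String)) (room_idx : Int) (chr : String) : Decidable (Pre_room_accepts rooms room_idx chr) := by unfold Pre_room_accepts; infer_instance
def pvWitness_room_accepts : List (List String) × Int × String := ([[".", "A", "."]], 0, "A")

def Spec_room_accepts (rooms : List (List String)) (room_idx : Int) (chr : String) (out : Bool × Int) : Prop := out = room_accepts_alt rooms room_idx chr
instance (rooms : List (List String)) (room_idx : Int) (chr : String) (out : Bool × Int) : Decidable (Spec_room_accepts rooms room_idx chr out) := by unfold Spec_room_accepts; infer_instance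

-- ===== CLAIM (what is proved, stated in full; the proofs are below) =====
def Claim_equal_room_accepts : Prop := ∀ (rooms : List (List String)) (room_idx : Int) (chr : String), Dom_room_accepts rooms room_idx chr → Pre_room_accepts rooms room_idx chr → Spec_room_accepts rooms room_idx chr (room_accepts rooms room_idx chr)

-- ===== LEMMAS AND PROOFS =====
-- reference: last index (offset s) of "." in col, or acc
def ld : List String → Int → Int → Int
  | [], _, acc => acc
  | c :: rest, s, acc => ld rest (s + 1) (if c == "." then s else acc)

theorem foldl_bStep (chr : String) (col : List String) (s : Int) (b : Bool) (i : Int) :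
    (PySem.List.enumerate col s).foldl (bStep chr) (b, i)
      = (b && col.all (fun c => c == "." || c == chr), ld col s i) := by
  induction col generalizing s b i with
  | nil => simp [PySem.List.enumerate_nil, ld]
  | cons c rest ih =>
    rw [PySem.List.enumerate_cons]
    simp only [List.foldl_cons, List.all_cons]
    by_cases hdot : c = "."
    · subst hdot
      simp [bStep, ld, ih]
    · by_cases hc : c = chr
      · subst hc
        simp [bStep, hdot, ld, ih]
      · simp [bStep, hdot, hc, ld, ih]

theorem ld_append (c : String) (xs : List String) (s i : Int) :
    ld (xs ++ [c]) s i = if c = "." then s + xs.length else ld xs s i := by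
  induction xs generalizing s i with
  | nil => by_cases h : c = "." <;> simp [ld, h]
  | cons x rest ih =>
    simp only [List.cons_append, ld, ih]
    by_cases h : c = "." <;> simp [h] <;> push_cast <;> ring

theorem aScan_append (c : String) (col : List String) (ds : List Int)
    (h : ∀ d ∈ ds, 0 ≤ d ∧ d < (col.length : Int)) :
    aScan (col ++ [c]) ds = aScan col ds := by
  induction ds with
  | nil => rfl
  | cons d rest ih =>
    have hd := h d (by simp)
    have hget : PySem.List.pyGetD (col ++ [c]) d "" = PySem.List.pyGetD col d "" := by
      rw [PySem.List.pyGetD_eq_getElem _ "" hd.1 (by simp; omega),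
          PySem.List.pyGetD_eq_getElem _ "" hd.1 hd.2]
      exact List.getElem_append_left (by omega)
    simp only [aScan, hget]
    rw [ih (fun d hm => h d (by simp [hm]))]

theorem aScan_eq_ld (col : List String) :
    aScan col (PySem.List.pyRange ((col.length : Int) - 1) (-1) (-1))
      = (if ld col 0 (-1) < 0 then (false, -1) else (true, ld col 0 (-1))) := by
  induction col using List.reverseRecOn with
  | nil =>
    rw [show ((List.length ([] : List String) : Int) - 1) = (-1 : Int) by simp,
        PySem.List.pyRange_neg_one_eq_nil (by norm_num)]
    simp [aScan, ld]
  | append_singleton col c ih =>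
    have hlen : ((col ++ [c]).length : Int) - 1 = (col.length : Int) := by simp
    rw [hlen, PySem.List.pyRange_neg_one_cons (by omega)]
    have hget : PySem.List.pyGetD (col ++ [c]) (col.length : Int) "" = c := by
      rw [PySem.List.pyGetD_eq_getElem _ "" (by omega) (by simp)]
      simp
    by_cases hdot : c = "."
    · subst hdot
      simp only [aScan, hget, ld_append, if_pos rfl, beq_self_eq_true, if_true]
      rw [if_neg (by omega)]
      simp
    · have hrange : ∀ d ∈ PySem.List.pyRange ((col.length : Int) - 1) (-1) (-1),
          0 ≤ d ∧ d < (col.length : Int) := by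
        intro d hm
        rw [PySem.List.mem_pyRange_neg_one] at hm
        omega
      simp only [aScan, hget, hdot]
      rw [if_neg (by simp [hdot]), aScan_append c col _ hrange, ih, ld_append]
      simp [hdot]

-- ===== VERDICT (by name: the statement is the Claim_ definition above) =====
theorem room_accepts_spec : Claim_equal_room_accepts := by
  intro rooms room_idx chr _ hpre
  unfold Spec_room_accepts room_accepts room_accepts_alt
  cases hget : PySem.List.pyGet? rooms room_idx with
  | none => rfl
  | some col =>
    simp only [foldl_bStep, Bool.true_and]
    by_cases hbad : col.any (fun c => !(c == "." || c == chr))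
    · have hallf : col.all (fun c => c == "." || c == chr) = false := by
        simpa [List.all_eq_not_any_not] using hbad
      rw [if_pos hbad, hallf]
      simp
    · have hall : col.all (fun c => c == "." || c == chr) = true := by
        simpa [List.all_eq_not_any_not] using hbad
      simp only [hbad, if_false, hall, Bool.not_true, Bool.false_or, aScan_eq_ld]
      by_cases hld : ld col 0 (-1) < 0 <;> simp [hld]
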